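-- pv_equiv track=rewrite | github.com/AutonomosCdM/vigia-medical-ai | src/core/unified_image_processor.py | _determine_severity_level
-- ===== SOURCE A (Python) =====
-- from typing import Dict, Any, Optional, List, Tuple
--
-- def _determine_severity_level(detection_results: Dict[str, Any]) -> str:
--     """Determine overall severity level"""
--     detections = detection_results.get("detections", [])
--
--     if not detections:
--         return "none"
--
--     max_grade = max(d.get("grade", 0) for d in detections)
--
--     if max_grade >= 3:
--         return "high"
--     elif max_grade >= 2:
--         return "medium"
--     elif max_grade >= 1:
--         return "low"
--     else:
--         return "none"
-- ===== SOURCE B (Python) =====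
-- def _determine_severity_level(detection_results):
--     """Determine overall severity level"""
--     detections = detection_results.get("detections", [])
--
--     if not detections:
--         return "none"
--
--     if any(d.get("grade", 0) >= 3 for d in detections):
--         return "high"
--     if any(d.get("grade", 0) >= 2 for d in detections):
--         return "medium"
--     if any(d.get("grade", 0) >= 1 for d in detections):
--         return "low"
--     return "none"
-- ===== Notes on version B (the rewrite author's own statement) =====
-- stated objective: alternative
-- what changed: Replaces the max-reduction over all grades followed by a branch cascade with descending threshold presence checks (any grade >= 3 / >= 2 / >= 1), which can stop at the first detection clearing a threshold.
import Mathlib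
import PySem

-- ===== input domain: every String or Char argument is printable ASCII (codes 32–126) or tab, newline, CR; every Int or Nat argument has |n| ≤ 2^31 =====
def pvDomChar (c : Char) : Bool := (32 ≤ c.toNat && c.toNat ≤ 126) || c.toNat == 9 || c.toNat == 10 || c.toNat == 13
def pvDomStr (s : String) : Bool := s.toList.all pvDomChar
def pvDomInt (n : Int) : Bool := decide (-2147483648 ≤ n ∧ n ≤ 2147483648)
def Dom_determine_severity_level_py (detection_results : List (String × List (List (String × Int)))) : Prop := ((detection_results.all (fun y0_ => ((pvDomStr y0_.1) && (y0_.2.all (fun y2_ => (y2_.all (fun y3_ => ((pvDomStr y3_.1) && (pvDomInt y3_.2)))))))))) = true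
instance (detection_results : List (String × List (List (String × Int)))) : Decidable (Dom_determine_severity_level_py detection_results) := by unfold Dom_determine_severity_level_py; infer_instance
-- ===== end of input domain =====

-- B replaces A's max-reduction plus branch cascade by descending threshold presence scans (alternative decomposition, same cost).

-- dict.get(k, dflt) on an association list: first match, else default (exact Python dict lookup)
def pvGetGrade (d : List (String × Int)) : Int :=
  match d.find? (fun p => p.1 == "grade") with
  | some p => p.2
  | none => 0

def pvGetDetections (m : List (String × List (List (String × Int)))) : List (List (String × Int)) :=
  match m.find? (fun p => p.1 == "detections") with
  | some p => p.2
  | none => []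

-- ===== PORT A =====
def determine_severity_level_py (detection_results : List (String × List (List (String × Int)))) : String :=
  let detections := pvGetDetections detection_results
  match detections with
  | [] => "none"
  | d :: rest =>
    -- max(d.get("grade", 0) for d in detections): running max over the nonempty generator
    let max_grade := rest.foldl (fun acc x => max acc (pvGetGrade x)) (pvGetGrade d)
    if max_grade ≥ 3 then "high"
    else if max_grade ≥ 2 then "medium"
    else if max_grade ≥ 1 then "low"
    else "none"

-- ===== PORT B =====
def determine_severity_level_py_alt (detection_results : List (String × List (List (String × Int)))) : String :=
  let detections := pvGetDetections detection_results
  if detections.isEmpty then "none"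
  else if detections.any (fun d => 3 ≤ pvGetGrade d) then "high"
  else if detections.any (fun d => 2 ≤ pvGetGrade d) then "medium"
  else if detections.any (fun d => 1 ≤ pvGetGrade d) then "low"
  else "none"

-- ===== PRECONDITION & SPEC =====
def Spec_determine_severity_level_py (detection_results : List (String × List (List (String × Int)))) (out : String) : Prop := out = determine_severity_level_py_alt detection_results
instance (detection_results : List (String × List (List (String × Int)))) (out : String) : Decidable (Spec_determine_severity_level_py detection_results out) := by unfold Spec_determine_severity_level_py; infer_instance

-- ===== CLAIM (what is proved, stated in full; the proofs are below) =====
def Claim_equal_determine_severity_level_py : Prop := ∀ (detection_results : List (String × List (List (String × Int)))), Dom_determine_severity_level_py detection_results → Spec_determine_severity_level_py detection_results (determine_severity_level_py detection_results)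

-- ===== LEMMAS AND PROOFS =====

-- some element (or the seed) clears threshold t iff the running max does
theorem any_eq_foldl_max (rest : List (List (String × Int))) (init t : Int) :
    (decide (t ≤ init) || rest.any (fun d => decide (t ≤ pvGetGrade d))) =
      decide (t ≤ rest.foldl (fun acc x => max acc (pvGetGrade x)) init) := by
  induction rest generalizing init with
  | nil => simp
  | cons h tl ih =>
    have e : decide (t ≤ max init (pvGetGrade h)) =
        (decide (t ≤ init) || decide (t ≤ pvGetGrade h)) := by
      rw [decide_eq_decide.mpr le_max_iff]; exact Bool.decide_or _ _
    simp only [List.any_cons, List.foldl_cons]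
    rw [← Bool.or_assoc, ← e, ih]; rfl



-- ===== VERDICT (by name: the statement is the Claim_ definition above) =====
theorem determine_severity_level_py_spec : Claim_equal_determine_severity_level_py := by
  intro dr _
  unfold Spec_determine_severity_level_py determine_severity_level_py determine_severity_level_py_alt
  cases h : pvGetDetections dr with
  | nil => simp
  | cons d rest =>
    have e3 := any_eq_foldl_max rest (pvGetGrade d) 3
    have e2 := any_eq_foldl_max rest (pvGetGrade d) 2
    have e1 := any_eq_foldl_max rest (pvGetGrade d) 1
    simp only [List.isEmpty_cons, Bool.false_eq_true, if_false, List.any_cons,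
      e3, e2, e1, decide_eq_true_eq, ge_iff_le]
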